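-- pv_equiv track=rewrite | github.com/Bharath-970/kaggle-comp | src/neurogolf/grid_codec.py | get_color_normalization_map
-- ===== SOURCE A (Python) =====
-- def get_color_normalization_map(grids: list[list[list[int]]]) -> list[int]:
--     """Return a 10-color permutation mapping observed colors to small indices.
--
--     Produces a bijection over the 10 ARC colors:
--     - Color 0 always maps to 0.
--     - Other colors are assigned in order of first appearance across `grids`.
--     - Remaining unseen colors fill the remaining indices in ascending order.
--     """
--     seen: list[int] = [0]
--     seen_set = {0}
--     for grid in grids:
--         for row in grid:
--             for val in row:
--                 if val not in seen_set:
--                     seen.append(val)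
--                     seen_set.add(val)
--
--     mapping = [0] * 10
--     # Assign observed colors to [0..len(seen)-1].
--     for new, old in enumerate(seen):
--         if 0 <= old < 10:
--             mapping[old] = new
--
--     next_new = len(seen)
--     for old in range(10):
--         if old in seen_set:
--             continue
--         mapping[old] = next_new
--         next_new += 1
--
--     return mapping
-- ===== SOURCE B (Python) =====
-- def get_color_normalization_map(grids: list[list[list[int]]]) -> list[int]:
--     """Rank-counting: instead of building the permutation list and inverting it,
--     compute each color's index directly — a seen color's index is the number of
--     distinct values that appear before its first occurrence in the value stream,
--     an unseen color's index is the number of distinct values plus the number of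
--     smaller unseen colors."""
--     stream = [0]
--     for grid in grids:
--         for row in grid:
--             stream.extend(row)
--     total = len(set(stream))
--     mapping = []
--     for c in range(10):
--         if c in stream:
--             mapping.append(len(set(stream[:stream.index(c)])))
--         else:
--             mapping.append(total + sum(1 for d in range(c) if d not in stream))
--     return mapping
-- ===== Notes on version B (the rewrite author's own statement) =====
-- stated objective: alternative
-- what changed: A builds the first-appearance permutation (seen list + seen_set) and then inverts it into the mapping with two fill loops; B never builds that permutation: it computes each color's index directly by rank counting over the flattened value stream - a seen color's index is the number of distinct values before its first occurrence, an unseen color's index is the total number of distinct values plus the count of smaller unseen colors.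
import Mathlib
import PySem

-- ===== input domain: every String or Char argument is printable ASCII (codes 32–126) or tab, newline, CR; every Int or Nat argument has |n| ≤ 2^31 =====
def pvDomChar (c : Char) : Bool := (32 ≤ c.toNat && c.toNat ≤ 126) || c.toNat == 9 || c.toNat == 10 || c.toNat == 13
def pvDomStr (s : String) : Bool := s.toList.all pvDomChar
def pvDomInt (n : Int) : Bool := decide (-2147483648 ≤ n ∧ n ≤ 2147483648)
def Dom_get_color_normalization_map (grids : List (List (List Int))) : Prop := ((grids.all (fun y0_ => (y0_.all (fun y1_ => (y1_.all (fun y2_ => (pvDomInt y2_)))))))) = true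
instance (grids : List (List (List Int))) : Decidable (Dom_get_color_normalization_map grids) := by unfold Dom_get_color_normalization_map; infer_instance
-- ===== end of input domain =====

-- B replaces A's build-the-permutation-then-invert scheme (seen list + two
-- mapping-fill loops) by direct rank counting: each color's index is computed
-- on its own from the value stream (objective: alternative, same cost).

-- ===== PORT A =====
def get_color_normalization_map (grids : List (List (List Int))) : List Int :=
  let st := grids.foldl (fun st grid =>
      grid.foldl (fun st row =>
        row.foldl (fun (st : List Int × PySem.Set Int) val =>
          if PySem.Set.contains st.2 val then st
          else (st.1 ++ [val], PySem.Set.add st.2 val)) st) st)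
    ([0], PySem.Set.ofList [0])
  let seen := st.1
  let seenSet := st.2
  let mapping0 := List.replicate 10 (0 : Int)
  -- for new, old in enumerate(seen): if 0 <= old < 10: mapping[old] = new
  let mapping1 := (PySem.List.enumerate seen 0).foldl
      (fun m (p : Int × Int) => if 0 ≤ p.2 ∧ p.2 < 10 then PySem.List.pySetD m p.2 p.1 else m)
      mapping0
  -- next_new = len(seen); for old in range(10): …
  let st2 := (PySem.List.pyRange 0 10 1).foldl
      (fun (p : List Int × Int) old =>
        if PySem.Set.contains seenSet old then p
        else (PySem.List.pySetD p.1 old p.2, p.2 + 1))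
      (mapping1, (seen.length : Int))
  st2.1

-- ===== PORT B =====
def get_color_normalization_map_alt (grids : List (List (List Int))) : List Int :=
  -- stream = [0]; for grid in grids: for row in grid: stream.extend(row)
  let stream := grids.foldl (fun s grid => grid.foldl (fun s row => s ++ row) s) [(0 : Int)]
  let total := PySem.Set.len (PySem.Set.ofList stream)        -- len(set(stream))
  -- for c in range(10): mapping.append(…)
  (PySem.List.pyRange 0 10 1).foldl (fun acc c =>
    if stream.contains c then
      -- len(set(stream[:stream.index(c)]))
      let i := (PySem.List.index? stream c).getD 0
      acc ++ [(PySem.Set.len (PySem.Set.ofList (PySem.List.slice stream none (some (i : Int)))))]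
    else
      -- total + sum(1 for d in range(c) if d not in stream)
      acc ++ [total + (((PySem.List.pyRange 0 c 1).countP (fun d => !(stream.contains d))) : Int)]) []

-- ===== PRECONDITION & SPEC =====
def Spec_get_color_normalization_map (grids : List (List (List Int))) (out : List Int) : Prop := out = get_color_normalization_map_alt grids
instance (grids : List (List (List Int))) (out : List Int) : Decidable (Spec_get_color_normalization_map grids out) := by unfold Spec_get_color_normalization_map; infer_instance

-- ===== CLAIM (what is proved, stated in full; the proofs are below) =====
def Claim_equal_get_color_normalization_map : Prop := ∀ (grids : List (List (List Int))), Dom_get_color_normalization_map grids → Spec_get_color_normalization_map grids (get_color_normalization_map grids)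

-- ===== LEMMAS AND PROOFS =====

-- the value stream: [0] followed by every grid value in reading order
def pvStream (grids : List (List (List Int))) : List Int :=
  (0 : Int) :: grids.flatMap (fun grid => grid.flatMap (fun row => row))

-- what B appends for color c, phrased over the stream
def pvRank (s : List Int) (c : Int) : Int :=
  if s.contains c then
    ((PySem.Set.ofList (s.take (List.idxOf c s))).length : Int)
  else
    ((PySem.Set.ofList s).length : Int) + (((PySem.List.pyRange 0 c 1).countP (fun d => !(s.contains d))) : Int)

theorem pv_stream_eq (grids : List (List (List Int))) :
    grids.foldl (fun s grid => grid.foldl (fun s row => s ++ row) s) [(0 : Int)] = pvStream grids := by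
  suffices h : ∀ (gs : List (List (List Int))) (s : List Int),
      gs.foldl (fun s grid => grid.foldl (fun s row => s ++ row) s) s
        = s ++ gs.flatMap (fun grid => grid.flatMap (fun row => row)) by
    simpa [pvStream] using h grids [0]
  intro gs
  induction gs with
  | nil => simp
  | cons g gs ih =>
    intro s
    simp [PySem.List.foldl_append_eq_flatten, List.flatMap_def]

theorem pv_idxOf?_of_mem (s : List Int) (c : Int) (h : c ∈ s) :
    List.idxOf? c s = some (List.idxOf c s) := by
  induction s with
  | nil => simp at h
  | cons x t ih =>
    by_cases hx : x = c
    · simp [hx, List.idxOf?_cons]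
    · rcases List.mem_cons.mp h with h1 | h1
      · exact absurd h1.symm hx
      · simp [List.idxOf?_cons, hx, ih h1]

theorem pv_fold_rank (s : List Int) (l : List Int) (acc : List Int) :
    l.foldl (fun acc c =>
      if s.contains c then
        let i := (PySem.List.index? s c).getD 0
        acc ++ [PySem.Set.len (PySem.Set.ofList (PySem.List.slice s none (some (i : Int))))]
      else
        acc ++ [PySem.Set.len (PySem.Set.ofList s) + (((PySem.List.pyRange 0 c 1).countP (fun d => !(s.contains d))) : Int)]) acc
      = acc ++ l.map (pvRank s) := by
  induction l generalizing acc with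
  | nil => simp
  | cons c l ih =>
    simp only [List.foldl_cons, List.map_cons]
    by_cases h : s.contains c
    · have hm : c ∈ s := by simpa using h
      rw [if_pos h, ih]
      have : pvRank s c = PySem.Set.len (PySem.Set.ofList (PySem.List.slice s none (some (((PySem.List.index? s c).getD 0 : Nat) : Int)))) := by
        rw [PySem.List.index?_eq_idxOf?, pv_idxOf?_of_mem s c hm]
        simp [pvRank, hm, PySem.List.slice_to_natCast, PySem.Set.len]
      simp [this]
    · have hm : c ∉ s := by simpa using h
      rw [if_neg h, ih]
      have : pvRank s c = PySem.Set.len (PySem.Set.ofList s) + (((PySem.List.pyRange 0 c 1).countP (fun d => !(s.contains d))) : Int) := by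
        simp [pvRank, hm, PySem.Set.len]
      simp [this]

theorem pv_B_eq_map (grids : List (List (List Int))) :
    get_color_normalization_map_alt grids
      = (PySem.List.pyRange 0 10 1).map (pvRank (pvStream grids)) := by
  unfold get_color_normalization_map_alt
  simp only [pv_stream_eq, pv_fold_rank, List.nil_append]

-- A's collector fold keeps its (seen, seen_set) pair equal and acts as Set.add on both
theorem pv_foldC_diag (l : List Int) (x : List Int) :
    l.foldl (fun (st : List Int × PySem.Set Int) val =>
        if PySem.Set.contains st.2 val then st
        else (st.1 ++ [val], PySem.Set.add st.2 val)) (x, x)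
      = (l.foldl PySem.Set.add x, l.foldl PySem.Set.add x) := by
  induction l generalizing x with
  | nil => rfl
  | cons v l ih =>
    simp only [List.foldl_cons]
    by_cases h : v ∈ x
    · simpa [PySem.Set.add, PySem.Set.contains, h] using ih x
    · simpa [PySem.Set.add, PySem.Set.contains, h] using ih (x ++ [v])

-- nested fold over grids/rows = fold over the flattened value list
theorem pv_fold_nested {σ : Type} (g : σ → Int → σ) (grids : List (List (List Int))) (s : σ) :
    grids.foldl (fun st grid => grid.foldl (fun st row => row.foldl g st) st) s
      = (grids.flatMap (fun grid => grid.flatMap (fun row => row))).foldl g s := by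
  induction grids generalizing s with
  | nil => rfl
  | cons grid grids ih =>
    simp only [List.flatMap_cons, List.foldl_append, List.foldl_cons, ih]
    congr 1
    induction grid generalizing s with
    | nil => rfl
    | cons row rows ih2 => simp [List.foldl_append, ih2]

theorem pv_getD_set (m : List Int) (j k : Nat) (v : Int) (hj : j < m.length) :
    (m.set j v).getD k 0 = if j = k then v else m.getD k 0 := by
  simp [List.getD_eq_getElem?_getD, List.getElem?_set]
  split_ifs with h1 <;> simp_all

theorem pv_fill1_len (l : List (Int × Int)) (m : List Int) :
    (l.foldl (fun m (p : Int × Int) => if 0 ≤ p.2 ∧ p.2 < 10 then PySem.List.pySetD m p.2 p.1 else m) m).length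
      = m.length := by
  induction l generalizing m with
  | nil => rfl
  | cons p l ih =>
    simp only [List.foldl_cons]
    rw [ih]
    split_ifs with h
    · exact PySem.List.length_pySetD ..
    · rfl

theorem pv_fill1 (l : List Int) (hnd : l.Nodup) (n : Int) (m : List Int) (hm : m.length = 10)
    (k : Nat) (hk : k < 10) :
    ((PySem.List.enumerate l n).foldl
        (fun m (p : Int × Int) => if 0 ≤ p.2 ∧ p.2 < 10 then PySem.List.pySetD m p.2 p.1 else m) m).getD k 0
      = if (k : Int) ∈ l then n + (List.idxOf (k : Int) l : Int) else m.getD k 0 := by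
  induction l generalizing n m with
  | nil => simp [PySem.List.enumerate_nil]
  | cons x l ih =>
    rw [PySem.List.enumerate_cons]
    simp only [List.foldl_cons]
    have hnd' : l.Nodup := hnd.of_cons
    by_cases hx : x = (k : Int)
    · have hcond : 0 ≤ x ∧ x < 10 := by constructor <;> omega
      rw [if_pos hcond]
      have hxl : x ∉ l := (List.nodup_cons.mp hnd).1
      have hset : PySem.List.pySetD m x n = m.set k n := by
        rw [hx]; simp
      rw [hset, ih hnd' (n + 1) _ (by simp [hm])]
      rw [if_neg (by rw [← hx]; exact hxl)]
      rw [pv_getD_set m k k n (by omega), if_pos rfl]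
      simp [hx]
    · have hstep : (if 0 ≤ x ∧ x < 10 then PySem.List.pySetD m x n else m).getD k 0 = m.getD k 0 := by
        split_ifs with h
        · rw [PySem.List.pySetD_of_nonneg m n h.1, pv_getD_set m x.toNat k n (by omega)]
          rw [if_neg (by omega)]
        · rfl
      have hlen : (if 0 ≤ x ∧ x < 10 then PySem.List.pySetD m x n else m).length = 10 := by
        split_ifs
        · rw [PySem.List.length_pySetD]; exact hm
        · exact hm
      rw [ih hnd' (n + 1) _ hlen, hstep]
      by_cases hkl : (k : Int) ∈ l
      · rw [if_pos hkl, if_pos (List.mem_cons_of_mem _ hkl)]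
        rw [List.idxOf_cons]
        have : (x == (k : Int)) = false := by simp [hx]
        rw [this]
        simp only [cond_false]
        push_cast
        ring
      · rw [if_neg hkl, if_neg (by simp [hkl, Ne.symm, hx])]

theorem pv_fill2 (seen : List Int) (t : Nat) : ∀ (a : Int), a = 10 - (t : Int) → 0 ≤ a →
    ∀ (m : List Int), m.length = 10 → ∀ (n : Int) (k : Nat), k < 10 →
    (((PySem.List.pyRange a 10 1).foldl
        (fun (p : List Int × Int) old =>
          if PySem.Set.contains seen old then p
          else (PySem.List.pySetD p.1 old p.2, p.2 + 1)) (m, n)).1).getD k 0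
      = if (k : Int) < a then m.getD k 0
        else if (k : Int) ∈ seen then m.getD k 0
        else n + (((PySem.List.pyRange a (k : Int) 1).countP (fun d => !(seen.contains d))) : Int) := by
  induction t with
  | zero =>
    intro a ha _ m hm n k hk
    subst ha
    rw [PySem.List.pyRange_one_eq_nil (by omega)]
    rw [if_pos (by omega)]
    rfl
  | succ t ih =>
    intro a ha ha0 m hm n k hk
    have hlt : a < 10 := by omega
    rw [PySem.List.pyRange_one_cons hlt]
    simp only [List.foldl_cons]
    by_cases hs : a ∈ seen
    · have hc : PySem.Set.contains seen a = true := by simp [hs]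
      rw [if_pos hc]
      rw [ih (a + 1) (by omega) (by omega) m hm n k hk]
      by_cases h1 : (k : Int) < a
      · rw [if_pos (show (k : Int) < a + 1 by omega), if_pos h1]
      · by_cases h2 : (k : Int) = a
        · rw [if_pos (show (k : Int) < a + 1 by omega), if_neg h1,
              if_pos (show (k : Int) ∈ seen by rw [h2]; exact hs)]
        · rw [if_neg (show ¬ (k : Int) < a + 1 by omega), if_neg h1]
          by_cases h3 : (k : Int) ∈ seen
          · rw [if_pos h3, if_pos h3]
          · rw [if_neg h3, if_neg h3,
                PySem.List.pyRange_one_cons (show a < (k : Int) by omega), List.countP_cons]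
            have hca : (!(seen.contains a)) = false := by simp [hs]
            rw [hca]
            simp
    · have hc : PySem.Set.contains seen a = false := by simp [hs]
      rw [if_neg (show ¬ PySem.Set.contains seen a = true by simp [hs])]
      have hm2 : (PySem.List.pySetD m a n).length = 10 := by rw [PySem.List.length_pySetD]; exact hm
      rw [ih (a + 1) (by omega) (by omega) _ hm2 (n + 1) k hk]
      have hset : (PySem.List.pySetD m a n).getD k 0 = if a = (k : Int) then n else m.getD k 0 := by
        rw [PySem.List.pySetD_of_nonneg m n ha0, pv_getD_set m a.toNat k n (by omega)]
        split_ifs with g1 g2 g3 <;> first | rfl | omega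
      rw [hset]
      by_cases h1 : (k : Int) < a
      · rw [if_pos (show (k : Int) < a + 1 by omega), if_pos h1,
            if_neg (show ¬ a = (k : Int) by omega)]
      · by_cases h2 : (k : Int) = a
        · rw [if_pos (show (k : Int) < a + 1 by omega), if_pos (show a = (k : Int) by omega),
              if_neg h1, if_neg (show ¬ (k : Int) ∈ seen by rw [h2]; exact hs),
              PySem.List.pyRange_one_eq_nil (show (k : Int) ≤ a by omega)]
          simp
        · rw [if_neg (show ¬ (k : Int) < a + 1 by omega), if_neg h1]
          by_cases h3 : (k : Int) ∈ seen
          · rw [if_pos h3, if_pos h3, if_neg (show ¬ a = (k : Int) by omega)]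
          · rw [if_neg h3, if_neg h3,
                PySem.List.pyRange_one_cons (show a < (k : Int) by omega), List.countP_cons]
            have hca : (!(seen.contains a)) = true := by simp [hs]
            rw [hca]
            simp
            omega

-- foldl Set.add only appends: the accumulator is a prefix of the result

theorem pv_foldl_add_prefix (s : List Int) : ∀ (acc : List Int), ∃ e, s.foldl PySem.Set.add acc = acc ++ e := by
  induction s with
  | nil => exact fun acc => ⟨[], by simp⟩
  | cons x t ih =>
    intro acc
    rw [List.foldl_cons]
    by_cases h : x ∈ acc
    · rw [PySem.Set.add_of_mem h]; exact ih acc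
    · rw [PySem.Set.add_of_not_mem h]
      obtain ⟨e, he⟩ := ih (acc ++ [x])
      exact ⟨x :: e, by simpa using he⟩

-- a seen value's position in the dedup list = number of distinct values before
-- its first occurrence in the stream
theorem pv_idx_rank_gen (s : List Int) : ∀ (acc : List Int) (c : Int), c ∉ acc → c ∈ s →
    List.idxOf c (s.foldl PySem.Set.add acc)
      = (List.foldl PySem.Set.add acc (s.take (List.idxOf c s))).length := by
  induction s with
  | nil => intro _ _ _ h; simp at h
  | cons x t ih =>
    intro acc c hca hcs
    by_cases hx : x = c
    · subst hx
      rw [List.idxOf_cons_self, List.take_zero, List.foldl_nil, List.foldl_cons,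
          PySem.Set.add_of_not_mem hca]
      obtain ⟨e, he⟩ := pv_foldl_add_prefix t (acc ++ [x])
      rw [he, List.append_assoc, List.idxOf_append, if_neg hca]
      simp
    · have hct : c ∈ t := List.mem_of_ne_of_mem (fun h => hx h.symm) hcs
      rw [List.foldl_cons]
      have hidx : List.idxOf c (x :: t) = List.idxOf c t + 1 := by
        rw [List.idxOf_cons]
        have : (x == c) = false := by simp [hx]
        rw [this]
        rfl
      rw [hidx, List.take_succ_cons, List.foldl_cons]
      by_cases h : x ∈ acc
      · rw [PySem.Set.add_of_mem h]
        exact ih acc c hca hct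
      · rw [PySem.Set.add_of_not_mem h]
        have hca2 : c ∉ acc ++ [x] := by
          intro hmem
          rcases List.mem_append.mp hmem with hm | hm
          · exact hca hm
          · exact hx (List.mem_singleton.mp hm).symm
        exact ih (acc ++ [x]) c hca2 hct

theorem pv_fill2_len (seen : List Int) (l : List Int) : ∀ (m : List Int) (n : Int),
    (((l.foldl (fun (p : List Int × Int) old =>
        if PySem.Set.contains seen old then p
        else (PySem.List.pySetD p.1 old p.2, p.2 + 1)) (m, n)).1)).length = m.length := by
  induction l with
  | nil => intro m n; rfl
  | cons x l ih =>
    intro m n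
    rw [List.foldl_cons]
    split_ifs with h
    · exact ih m n
    · rw [ih, PySem.List.length_pySetD]

theorem pv_A_eq_map (grids : List (List (List Int))) :
    get_color_normalization_map grids
      = (PySem.List.pyRange 0 10 1).map (pvRank (pvStream grids)) := by
  unfold get_color_normalization_map
  simp only [pv_fold_nested, show PySem.Set.ofList [(0 : Int)] = [(0 : Int)] from rfl, pv_foldC_diag]
  set flat := grids.flatMap (fun grid => grid.flatMap (fun row => row)) with hflat
  set S := flat.foldl PySem.Set.add [(0 : Int)] with hSdef
  have hS : S = PySem.Set.ofList (pvStream grids) := by rw [hSdef, hflat]; rfl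
  have hmemS : ∀ c : Int, c ∈ S ↔ c ∈ pvStream grids := by
    intro c; rw [hS]; simp [PySem.Set.mem_ofList]
  have hnd : S.Nodup := by rw [hS]; exact PySem.Set.nodup_ofList _
  have hlen1 : (List.foldl (fun m (p : Int × Int) => if 0 ≤ p.2 ∧ p.2 < 10 then PySem.List.pySetD m p.2 p.1 else m)
      (List.replicate 10 0) (PySem.List.enumerate S)).length = 10 := by
    rw [pv_fill1_len, List.length_replicate]
  apply List.ext_getElem
  · rw [pv_fill2_len, hlen1, List.length_map, PySem.List.length_pyRange_one]; decide
  · intro k hk1 hk2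
    have hk10 : k < 10 := by rwa [pv_fill2_len, hlen1] at hk1
    rw [← List.getD_eq_getElem _ 0 hk1]
    rw [pv_fill2 S 10 0 (by norm_num) (by norm_num) _ hlen1 _ k hk10]
    rw [if_neg (by omega)]
    rw [List.getElem_map, PySem.List.getElem_pyRange_one]
    have hzk : (0 : Int) + k = (k : Int) := by ring
    rw [hzk]
    by_cases hmem : (k : Int) ∈ S
    · rw [if_pos hmem]
      rw [pv_fill1 S hnd 0 _ (by rw [List.length_replicate]) k hk10, if_pos hmem]
      have hmemStream : (k : Int) ∈ pvStream grids := (hmemS _).mp hmem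
      have hcont : (pvStream grids).contains (k : Int) = true := by
        simpa using hmemStream
      rw [pvRank, if_pos hcont]
      have := pv_idx_rank_gen (pvStream grids) [] (k : Int) (by simp) hmemStream
      rw [hS, PySem.Set.ofList_eq_foldl, PySem.Set.ofList_eq_foldl, this]
      simp
    · rw [if_neg hmem]
      have hmemStream : (k : Int) ∉ pvStream grids := fun h => hmem ((hmemS _).mpr h)
      have hcont : (pvStream grids).contains (k : Int) = false := by
        simpa using hmemStream
      rw [pvRank, if_neg (show ¬ (pvStream grids).contains (k : Int) = true by simpa using hmemStream)]
      have hlenS : S.length = (PySem.Set.ofList (pvStream grids)).length := by rw [hS]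
      have hcnt : (fun d => !(List.contains S d)) = (fun d => !(List.contains (pvStream grids) d)) := by
        funext d
        by_cases hd : d ∈ S
        · simp [hd, (hmemS d).mp hd]
        · have hd2 : d ∉ pvStream grids := fun h => hd ((hmemS d).mpr h)
          simp [hd, hd2]
      rw [hlenS, hcnt]

-- ===== VERDICT (by name: the statement is the Claim_ definition above) =====
theorem get_color_normalization_map_spec : Claim_equal_get_color_normalization_map := by
  intro grids _
  unfold Spec_get_color_normalization_map
  rw [pv_A_eq_map, pv_B_eq_map]
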